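-- pv_equiv track=rewrite | github.com/Szymon-Budziak/Introduction_to_Computer_Science_course_AGH | Section_2/Exercise_05.py | bit_mask
-- ===== SOURCE A (Python) =====
-- def bit_mask(number, mask):
--     actual_number = 0
--     while number > 0:
--         if mask % 2 == 1:
--             actual_number *= 10
--             actual_number += number % 10
--         number //= 10
--         mask //= 2
--     new_number = 0
--     while actual_number > 0:
--         new_number *= 10
--         new_number += actual_number % 10
--         actual_number //= 10
--     return new_number
-- ===== SOURCE B (Python) =====
-- def bit_mask(number, mask):
--     result = 0
--     place = 1
--     while number > 0:
--         number, digit = divmod(number, 10)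
--         if mask % 2 == 1:
--             result += digit * place
--             place *= 10
--         mask //= 2
--     return result
-- ===== Notes on version B (the rewrite author's own statement) =====
-- stated objective: simpler
-- what changed: B rebuilds the selected number in one least-to-most-significant pass using a running place-value multiplier, replacing A's two loops (build a digit-reversed number, then reverse it again).
-- intended difference: On inputs where the lowest selected digit of number is 0 but some selected digit is nonzero (e.g. number=10, mask=3), A's reverse-and-reverse-again rebuild silently drops the trailing zeros and returns 1, while B returns the intended selected number 10. — e.g. on bit_mask(10, 3): A returns 1, B returns 10
import Mathlib
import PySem

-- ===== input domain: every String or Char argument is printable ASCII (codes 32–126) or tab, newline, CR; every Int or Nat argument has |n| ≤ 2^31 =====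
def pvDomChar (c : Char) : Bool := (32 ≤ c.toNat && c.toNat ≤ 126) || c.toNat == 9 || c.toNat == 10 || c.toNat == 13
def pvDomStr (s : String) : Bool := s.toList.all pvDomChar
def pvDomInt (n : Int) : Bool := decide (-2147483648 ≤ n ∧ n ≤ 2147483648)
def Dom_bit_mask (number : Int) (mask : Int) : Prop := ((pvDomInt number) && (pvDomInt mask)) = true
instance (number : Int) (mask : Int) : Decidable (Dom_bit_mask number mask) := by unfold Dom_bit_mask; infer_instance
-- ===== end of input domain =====

-- B replaces A's two integer loops (build digit-reversed number, reverse it again) by one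
-- least-to-most-significant pass with a place-value accumulator; on selections whose lowest
-- selected digit is 0 A silently drops trailing zeros and B returns the intended number (see D_).

-- termination helper used by the ports' loops (all decrease their first argument by //10)
theorem pv_toNat_div10_lt (n : Int) (h : 0 < n) : (PySem.Int.floordiv n 10).toNat < n.toNat := by
  rw [PySem.Int.floordiv_eq_ediv_of_pos (by norm_num)]
  omega

-- ===== PORT A =====
def bitMaskLoop1 (number mask actual : Int) : Int :=
  if h : 0 < number then
    bitMaskLoop1 (PySem.Int.floordiv number 10) (PySem.Int.floordiv mask 2)
      (if PySem.Int.mod mask 2 = 1 then actual * 10 + PySem.Int.mod number 10 else actual)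
  else actual
termination_by number.toNat
decreasing_by exact pv_toNat_div10_lt number h

def bitMaskLoop2 (actual new : Int) : Int :=
  if h : 0 < actual then
    bitMaskLoop2 (PySem.Int.floordiv actual 10) (new * 10 + PySem.Int.mod actual 10)
  else new
termination_by actual.toNat
decreasing_by exact pv_toNat_div10_lt actual h

def bit_mask (number : Int) (mask : Int) : Int :=
  bitMaskLoop2 (bitMaskLoop1 number mask 0) 0

-- ===== PORT B =====
def bitMaskAltLoop (number mask result place : Int) : Int :=
  if h : 0 < number then
    let digit := PySem.Int.mod number 10
    let number' := PySem.Int.floordiv number 10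
    if PySem.Int.mod mask 2 = 1 then
      bitMaskAltLoop number' (PySem.Int.floordiv mask 2) (result + digit * place) (place * 10)
    else
      bitMaskAltLoop number' (PySem.Int.floordiv mask 2) result place
  else result
termination_by number.toNat
decreasing_by all_goals exact pv_toNat_div10_lt number h

def bit_mask_alt (number : Int) (mask : Int) : Int :=
  bitMaskAltLoop number mask 0 1

-- ===== PRECONDITION & SPEC =====
-- On inputs where the lowest selected digit of number is 0 (position p: a valid digit position
-- whose mask bit is set, no mask bit set below it, digit 0) while some selected digit r is
-- nonzero, A's reverse-then-reverse-again rebuild silently drops the trailing zeros (e.g.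
-- A(10,3)=1) while B returns the intended selected number (B(10,3)=10).
-- (positions p < 10 cover every number admitted by Dom_bit_mask, since 2^31 < 10^10)
def D_bit_mask (number : Int) (mask : Int) : Prop :=
  0 < number ∧ ∃ p < 10, mask % 2 ^ p.succ = 2 ^ p ∧ 10 ∣ number / 10 ^ p ∧
    ∃ r < 10, Odd (mask / 2 ^ r) ∧ ¬ 10 ∣ number / 10 ^ r

instance (number : Int) (mask : Int) : Decidable (D_bit_mask number mask) := by
  unfold D_bit_mask; infer_instance

def Spec_bit_mask (number : Int) (mask : Int) (out : Int) : Prop :=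
  ¬ D_bit_mask number mask → out = bit_mask_alt number mask

instance (number : Int) (mask : Int) (out : Int) : Decidable (Spec_bit_mask number mask out) := by
  unfold Spec_bit_mask; infer_instance

def pvDiffWitness_bit_mask : Int × Int := (10, 3)
def pvDiffWitnessOut_bit_mask : Int × Int := (1, 10)

-- ===== CLAIM (what is proved, stated in full; the proofs are below) =====
def Claim_unchanged_bit_mask : Prop := ∀ (number : Int) (mask : Int), Dom_bit_mask number mask → Spec_bit_mask number mask (bit_mask number mask)
def Claim_exact_bit_mask : Prop := ∀ (number : Int) (mask : Int), Dom_bit_mask number mask → D_bit_mask number mask → bit_mask number mask ≠ bit_mask_alt number mask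
def Claim_changed_bit_mask : Prop := Dom_bit_mask (pvDiffWitness_bit_mask.1) (pvDiffWitness_bit_mask.2) ∧ D_bit_mask (pvDiffWitness_bit_mask.1) (pvDiffWitness_bit_mask.2) ∧ bit_mask (pvDiffWitness_bit_mask.1) (pvDiffWitness_bit_mask.2) = pvDiffWitnessOut_bit_mask.1 ∧ bit_mask_alt (pvDiffWitness_bit_mask.1) (pvDiffWitness_bit_mask.2) = pvDiffWitnessOut_bit_mask.2 ∧ pvDiffWitnessOut_bit_mask.1 ≠ pvDiffWitnessOut_bit_mask.2

-- ===== LEMMAS AND PROOFS =====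

-- the digits of `number` (least significant first) selected by the set bits of `mask`
def pvSelDigits (number mask : Int) : List Int :=
  if h : 0 < number then
    (if PySem.Int.mod mask 2 = 1 then [PySem.Int.mod number 10] else [])
      ++ pvSelDigits (PySem.Int.floordiv number 10) (PySem.Int.floordiv mask 2)
  else []
termination_by number.toNat
decreasing_by exact pv_toNat_div10_lt number h

-- position p of number is a selected digit position: p is a valid decimal position of number
-- (10^p ≤ number) and bit p of mask is set (Python floor semantics, also for negative mask)
def pvSelAt (number mask : Int) (p : Nat) : Prop :=
  10 ^ p ≤ number ∧ PySem.Int.mod (PySem.Int.floordiv mask (2 ^ p)) 2 = 1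

-- the decimal digit of number at position p (least significant = position 0)
def pvDigitAt (number : Int) (p : Nat) : Int :=
  PySem.Int.mod (PySem.Int.floordiv number (10 ^ p)) 10

theorem pv_selAt_iff (n m : Int) (p : Nat) :
    pvSelAt n m p ↔ 10 ^ p ≤ n ∧ m / 2 ^ p % 2 = 1 := by
  unfold pvSelAt
  rw [PySem.Int.floordiv_eq_ediv_of_pos (pow_pos (by norm_num) p),
      PySem.Int.mod_eq_emod_of_pos (by norm_num)]

theorem pv_digitAt_eq (n : Int) (p : Nat) : pvDigitAt n p = n / 10 ^ p % 10 := by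
  unfold pvDigitAt
  rw [PySem.Int.floordiv_eq_ediv_of_pos (pow_pos (by norm_num) p),
      PySem.Int.mod_eq_emod_of_pos (by norm_num)]

theorem pv_bits_zero_iff (m : Int) (p : Nat) :
    m % 2 ^ p = 0 ↔ ∀ q < p, ¬ m / 2 ^ q % 2 = 1 := by
  induction p with
  | zero => simp
  | succ p ih =>
    have h2p : (0:Int) < 2 ^ p := pow_pos (by norm_num) p
    constructor
    · intro hz q hq
      have hdvd : (2:Int) ^ (p + 1) ∣ m := Int.dvd_of_emod_eq_zero hz
      obtain ⟨k, hk⟩ := hdvd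
      rcases Nat.lt_succ_iff_lt_or_eq.1 hq with hq' | hq'
      · refine (ih.1 ?_) q hq'
        have : (2:Int) ^ p ∣ m := ⟨2 * k, by rw [hk, pow_succ]; ring⟩
        exact Int.emod_eq_zero_of_dvd this
      · subst hq'
        have hmq : m / 2 ^ q = 2 * k := by
          rw [hk, pow_succ, show (2:Int) ^ q * 2 * k = 2 ^ q * (2 * k) by ring,
              Int.mul_ediv_cancel_left _ h2p.ne']
        rw [hmq]
        omega
    · intro hall
      have hlow : m % 2 ^ p = 0 := ih.2 fun q hq => hall q (by omega)
      obtain ⟨t, ht⟩ := Int.dvd_of_emod_eq_zero hlow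
      have hbit := hall p (by omega)
      have htq : m / 2 ^ p = t := by
        rw [ht, Int.mul_ediv_cancel_left _ h2p.ne']
      rw [htq] at hbit
      have ht2 : t % 2 = 0 := by omega
      obtain ⟨u, hu⟩ := Int.dvd_of_emod_eq_zero ht2
      apply Int.emod_eq_zero_of_dvd
      exact ⟨u, by rw [ht, hu, pow_succ]; ring⟩

theorem pv_fd_fd (x b : Int) (p : Nat) (hb : 0 < b) :
    PySem.Int.floordiv (PySem.Int.floordiv x b) (b ^ p) = PySem.Int.floordiv x (b ^ (p + 1)) := by
  rw [PySem.Int.floordiv_eq_ediv_of_pos hb, PySem.Int.floordiv_eq_ediv_of_pos (pow_pos hb p),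
      PySem.Int.floordiv_eq_ediv_of_pos (pow_pos hb (p + 1)),
      Int.ediv_ediv_of_nonneg hb.le]
  congr 1
  ring

theorem pv_selAt_zero (n m : Int) : pvSelAt n m 0 ↔ 1 ≤ n ∧ PySem.Int.mod m 2 = 1 := by
  unfold pvSelAt
  rw [pow_zero, pow_zero, PySem.Int.floordiv_eq_ediv_of_pos (by norm_num : (0:Int) < 1),
      Int.ediv_one]

theorem pv_selAt_succ (n m : Int) (p : Nat) :
    pvSelAt n m (p + 1) ↔ pvSelAt (PySem.Int.floordiv n 10) (PySem.Int.floordiv m 2) p := by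
  unfold pvSelAt
  rw [pv_fd_fd m 2 p (by norm_num),
      PySem.Int.le_floordiv_iff_mul_le (by norm_num : (0:Int) < 10), ← pow_succ]

theorem pv_digitAt_zero (n : Int) : pvDigitAt n 0 = PySem.Int.mod n 10 := by
  unfold pvDigitAt
  rw [pow_zero, PySem.Int.floordiv_eq_ediv_of_pos (by norm_num : (0:Int) < 1), Int.ediv_one]

theorem pv_digitAt_succ (n : Int) (p : Nat) :
    pvDigitAt n (p + 1) = pvDigitAt (PySem.Int.floordiv n 10) p := by
  unfold pvDigitAt
  rw [pv_fd_fd n 10 p (by norm_num)]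

theorem pv_mem_iff (n m : Int) :
    (∃ d ∈ pvSelDigits n m, d ≠ 0) ↔ ∃ p : Nat, pvSelAt n m p ∧ pvDigitAt n p ≠ 0 := by
  fun_induction pvSelDigits n m with
  | case1 n m h ih =>
    constructor
    · rintro ⟨d, hd, hdne⟩
      rw [List.mem_append] at hd
      rcases hd with hd | hd
      · by_cases hm : PySem.Int.mod m 2 = 1
        · rw [if_pos hm, List.mem_singleton] at hd
          exact ⟨0, (pv_selAt_zero n m).2 ⟨by omega, hm⟩,
            by rw [pv_digitAt_zero, ← hd]; exact hdne⟩
        · rw [if_neg hm] at hd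
          simp at hd
      · obtain ⟨p, hsel, hdig⟩ := ih.1 ⟨d, hd, hdne⟩
        exact ⟨p + 1, (pv_selAt_succ n m p).2 hsel, by rw [pv_digitAt_succ]; exact hdig⟩
    · rintro ⟨p, hsel, hdig⟩
      cases p with
      | zero =>
        have h0 := (pv_selAt_zero n m).1 hsel
        refine ⟨PySem.Int.mod n 10, ?_, by rw [pv_digitAt_zero] at hdig; exact hdig⟩
        rw [List.mem_append]
        left
        rw [if_pos h0.2, List.mem_singleton]
      | succ p =>
        obtain ⟨d, hd, hdne⟩ := ih.2 ⟨p, (pv_selAt_succ n m p).1 hsel,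
          by rw [pv_digitAt_succ] at hdig; exact hdig⟩
        exact ⟨d, List.mem_append.2 (Or.inr hd), hdne⟩
  | case2 n m h =>
    constructor
    · rintro ⟨d, hd, -⟩
      simp at hd
    · rintro ⟨p, ⟨hp, -⟩, -⟩
      exfalso
      have hpow : (0:Int) < 10 ^ p := pow_pos (by norm_num) p
      omega

theorem pv_head_iff (n m : Int) :
    (pvSelDigits n m).head? = some 0
      ↔ ∃ p : Nat, pvSelAt n m p ∧ pvDigitAt n p = 0 ∧ ∀ q < p, ¬ pvSelAt n m q := by
  fun_induction pvSelDigits n m with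
  | case1 n m h ih =>
    by_cases hm : PySem.Int.mod m 2 = 1
    · rw [if_pos hm, List.singleton_append, List.head?_cons]
      constructor
      · intro hz
        rw [Option.some.injEq] at hz
        exact ⟨0, (pv_selAt_zero n m).2 ⟨by omega, hm⟩,
          by rw [pv_digitAt_zero]; exact hz, by intro q hq; omega⟩
      · rintro ⟨p, hsel, hdig, hmin⟩
        have hp0 : p = 0 := by
          by_contra hne
          exact hmin 0 (Nat.pos_of_ne_zero hne) ((pv_selAt_zero n m).2 ⟨by omega, hm⟩)
        subst hp0
        rw [pv_digitAt_zero] at hdig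
        rw [hdig]
    · rw [if_neg hm, List.nil_append, ih]
      constructor
      · rintro ⟨p, hsel, hdig, hmin⟩
        refine ⟨p + 1, (pv_selAt_succ n m p).2 hsel,
          by rw [pv_digitAt_succ]; exact hdig, ?_⟩
        intro q hq
        cases q with
        | zero => intro hc; exact hm ((pv_selAt_zero n m).1 hc).2
        | succ q => intro hc; exact hmin q (by omega) ((pv_selAt_succ n m q).1 hc)
      · rintro ⟨p, hsel, hdig, hmin⟩
        cases p with
        | zero => exact absurd ((pv_selAt_zero n m).1 hsel).2 hm
        | succ p =>
          exact ⟨p, (pv_selAt_succ n m p).1 hsel,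
            by rw [pv_digitAt_succ] at hdig; exact hdig,
            fun q hq hc => hmin (q + 1) (by omega) ((pv_selAt_succ n m q).2 hc)⟩
  | case2 n m h =>
    constructor
    · intro hc
      simp at hc
    · rintro ⟨p, ⟨hp, -⟩, -⟩
      exfalso
      have hpow : (0:Int) < 10 ^ p := pow_pos (by norm_num) p
      omega

theorem pv_pos_lt_ten (n : Int) (hn : n ≤ 2147483648) (p : Nat) (hp : (10:Int) ^ p ≤ n) :
    p < 10 := by
  by_contra hge
  have h1 : (10:Int) ^ 10 ≤ 10 ^ p := by
    gcongr
    · norm_num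
    · omega
  have h2 : (10:Int) ^ 10 = 10000000000 := by norm_num
  omega

theorem pv_pow_le_pow (q p : Nat) (h : q ≤ p) : (10:Int) ^ q ≤ 10 ^ p := by
  gcongr
  norm_num

theorem pv_lowbit_iff (m : Int) (p : Nat) :
    m % 2 ^ (p + 1) = 2 ^ p ↔ m / 2 ^ p % 2 = 1 ∧ m % 2 ^ p = 0 := by
  have h2p : (0:Int) < 2 ^ p := pow_pos (by norm_num) p
  constructor
  · intro h
    have hk : m = 2 ^ (p + 1) * (m / 2 ^ (p + 1)) + 2 ^ p := by
      conv_lhs => rw [← Int.ediv_add_emod m (2 ^ (p + 1))]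
      rw [h]
    set k := m / 2 ^ (p + 1) with hkdef
    constructor
    · have hq : m / 2 ^ p = 2 * k + 1 := by
        rw [hk, pow_succ, show (2:Int) ^ p * 2 * k + 2 ^ p = 2 ^ p * (2 * k + 1) by ring,
            Int.mul_ediv_cancel_left _ h2p.ne']
      rw [hq]
      omega
    · exact Int.emod_eq_zero_of_dvd ⟨2 * k + 1, by rw [hk, pow_succ]; ring⟩
  · rintro ⟨hbit, hlow⟩
    obtain ⟨t, ht⟩ := Int.dvd_of_emod_eq_zero hlow
    have htv : m / 2 ^ p = t := by rw [ht, Int.mul_ediv_cancel_left _ h2p.ne']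
    rw [htv] at hbit
    have ht2 : t = 2 * (t / 2) + 1 := by omega
    have hm : m = 2 ^ (p + 1) * (t / 2) + 2 ^ p := by
      calc m = 2 ^ p * t := ht
        _ = 2 ^ p * (2 * (t / 2) + 1) := by rw [← ht2]
        _ = 2 ^ (p + 1) * (t / 2) + 2 ^ p := by rw [pow_succ]; ring
    rw [hm, add_comm, Int.add_mul_emod_self_left]
    exact Int.emod_eq_of_lt h2p.le (by rw [pow_succ]; omega)

theorem pv_valid_of_digit_ne (n : Int) (r : Nat) (h0 : 0 ≤ n) (hd : n / 10 ^ r % 10 ≠ 0) :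
    10 ^ r ≤ n := by
  by_contra hc
  rw [Int.ediv_eq_zero_of_lt h0 (by omega)] at hd
  simp at hd

theorem pv_D_iff (n m : Int) (hn : n ≤ 2147483648) :
    D_bit_mask n m
      ↔ 0 < n ∧ (pvSelDigits n m).head? = some 0 ∧ ∃ d ∈ pvSelDigits n m, d ≠ 0 := by
  unfold D_bit_mask
  constructor
  · rintro ⟨h0, p, -, hlow, hd0', r, -, hbr', hdr'⟩
    have hd0 : n / 10 ^ p % 10 = 0 := Int.emod_eq_zero_of_dvd hd0'
    have hbr : m / 2 ^ r % 2 = 1 := Int.odd_iff.mp hbr'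
    have hdr : n / 10 ^ r % 10 ≠ 0 := fun hc => hdr' (Int.dvd_of_emod_eq_zero hc)
    obtain ⟨hbit, hz⟩ := (pv_lowbit_iff m p).1 hlow
    have hvr : (10:Int) ^ r ≤ n := pv_valid_of_digit_ne n r h0.le hdr
    have hpr : p ≤ r := by
      by_contra hc
      exact ((pv_bits_zero_iff m p).1 hz) r (by omega) hbr
    have hv : (10:Int) ^ p ≤ n := le_trans (pv_pow_le_pow p r hpr) hvr
    refine ⟨h0, (pv_head_iff n m).2 ⟨p, (pv_selAt_iff n m p).2 ⟨hv, hbit⟩,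
      by rw [pv_digitAt_eq]; exact hd0, ?_⟩,
      (pv_mem_iff n m).2 ⟨r, (pv_selAt_iff n m r).2 ⟨hvr, hbr⟩,
        by rw [pv_digitAt_eq]; exact hdr⟩⟩
    intro q hq hc
    exact ((pv_bits_zero_iff m p).1 hz) q hq ((pv_selAt_iff n m q).1 hc).2
  · rintro ⟨h0, hh, hmem⟩
    obtain ⟨p, hsel, hd0, hmin⟩ := (pv_head_iff n m).1 hh
    obtain ⟨r, hselr, hdr⟩ := (pv_mem_iff n m).1 hmem
    obtain ⟨hv, hb⟩ := (pv_selAt_iff n m p).1 hsel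
    obtain ⟨hvr, hbr⟩ := (pv_selAt_iff n m r).1 hselr
    have hz : m % 2 ^ p = 0 := (pv_bits_zero_iff m p).2 fun q hq hcb =>
      hmin q hq ((pv_selAt_iff n m q).2 ⟨le_trans (pv_pow_le_pow q p (by omega)) hv, hcb⟩)
    rw [pv_digitAt_eq] at hd0 hdr
    exact ⟨h0, p, pv_pos_lt_ten n hn p hv, (pv_lowbit_iff m p).2 ⟨hb, hz⟩,
      Int.dvd_of_emod_eq_zero hd0,
      r, pv_pos_lt_ten n hn r hvr, Int.odd_iff.mpr hbr,
      fun hc => hdr (Int.emod_eq_zero_of_dvd hc)⟩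

theorem pv_sel_empty (number mask : Int) (h : ¬ 0 < number) : pvSelDigits number mask = [] := by
  rw [pvSelDigits]; simp [h]

theorem pv_sel_bounds (number mask : Int) :
    ∀ d ∈ pvSelDigits number mask, 0 ≤ d ∧ d < 10 := by
  fun_induction pvSelDigits number mask with
  | case1 n m h ih =>
    intro d hd
    rw [List.mem_append] at hd
    rcases hd with hd | hd
    · simp at hd
      obtain ⟨-, hd⟩ := hd
      omega
    · exact ih d hd
  | case2 n m h => simp

theorem pv_loop1_eq (number mask actual : Int) :
    bitMaskLoop1 number mask actual
      = (pvSelDigits number mask).foldl (fun a d => a * 10 + d) actual := by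
  fun_induction bitMaskLoop1 number mask actual with
  | case1 n m acc h ih =>
    rw [pvSelDigits, dif_pos h]
    simp at ih ⊢
    by_cases hm : m % 2 = 1
    · simp [hm] at ih ⊢
      exact ih
    · simp [hm] at ih ⊢
      exact ih
  | case2 n m acc h =>
    rw [pvSelDigits, dif_neg h]
    rfl

theorem pv_altloop_eq (number mask result place : Int) :
    bitMaskAltLoop number mask result place
      = result + place * (pvSelDigits number mask).foldr (fun d a => d + 10 * a) 0 := by
  fun_induction bitMaskAltLoop number mask result place with
  | case1 n m res pl h1 dg n' hm ih =>
    have hdg : dg = PySem.Int.mod n 10 := rfl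
    have hn' : n' = PySem.Int.floordiv n 10 := rfl
    rw [pvSelDigits, dif_pos h1, if_pos hm]
    rw [hdg, hn'] at ih
    rw [ih]
    simp only [List.foldr_append, List.foldr_cons, List.foldr_nil]
    ring
  | case2 n m res pl h1 n' hm ih =>
    have hn' : n' = PySem.Int.floordiv n 10 := rfl
    rw [pvSelDigits, dif_pos h1, if_neg hm]
    rw [hn'] at ih
    rw [ih, List.nil_append]
  | case3 n m res pl h =>
    rw [pvSelDigits, dif_neg h]
    simp

theorem pv_foldl_nonneg (L : List Int) (acc : Int) (hL : ∀ d ∈ L, 0 ≤ d) (ha : 0 ≤ acc) :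
    0 ≤ L.foldl (fun a d => a * 10 + d) acc := by
  induction L generalizing acc with
  | nil => exact ha
  | cons d t ih =>
    have hd := hL d (by simp)
    exact ih (acc * 10 + d) (fun x hx => hL x (List.mem_cons_of_mem _ hx)) (by nlinarith)

theorem pv_foldl_pos (L : List Int) (acc : Int) (hL : ∀ d ∈ L, 0 ≤ d) (ha : 0 < acc) :
    0 < L.foldl (fun a d => a * 10 + d) acc := by
  induction L generalizing acc with
  | nil => exact ha
  | cons d t ih =>
    have hd := hL d (by simp)
    exact ih (acc * 10 + d) (fun x hx => hL x (List.mem_cons_of_mem _ hx)) (by nlinarith)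

theorem pv_foldl_zero (L : List Int) (hL : ∀ d ∈ L, d = 0) :
    L.foldl (fun a d => a * 10 + d) 0 = 0 := by
  induction L with
  | nil => rfl
  | cons d t ih =>
    have hd := hL d (by simp)
    simp [hd, ih (fun x hx => hL x (by simp [hx]))]

theorem pv_foldr_zero (L : List Int) (hL : ∀ d ∈ L, d = 0) :
    L.foldr (fun d a => d + 10 * a) 0 = 0 := by
  induction L with
  | nil => rfl
  | cons d t ih =>
    have hd := hL d (by simp)
    simp [hd, ih (fun x hx => hL x (by simp [hx]))]

theorem pv_foldl_reverse_eq_foldr (L : List Int) :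
    L.reverse.foldl (fun a d => a * 10 + d) 0 = L.foldr (fun d a => d + 10 * a) 0 := by
  induction L with
  | nil => rfl
  | cons d t ih =>
    simp [List.foldl_append, ih]
    ring

theorem pv_loop2_stop (actual new : Int) (h : ¬ 0 < actual) : bitMaskLoop2 actual new = new := by
  rw [bitMaskLoop2]; simp [h]

theorem pv_loop2_be (L : List Int) (hb : ∀ d ∈ L, 0 ≤ d ∧ d < 10)
    (hh : ∀ d0, L.head? = some d0 → 0 < d0) (acc : Int) :
    bitMaskLoop2 (L.foldl (fun a d => a * 10 + d) 0) acc
      = L.reverse.foldl (fun a d => a * 10 + d) acc := by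
  induction L using List.reverseRecOn generalizing acc with
  | nil => simpa using pv_loop2_stop 0 acc (by norm_num)
  | append_singleton L' d ih =>
    have hb' : ∀ x ∈ L', 0 ≤ x ∧ x < 10 := fun x hx => hb x (by simp [hx])
    have hd : 0 ≤ d ∧ d < 10 := hb d (by simp)
    have hbe : 0 ≤ L'.foldl (fun a d => a * 10 + d) 0 :=
      pv_foldl_nonneg L' 0 (fun x hx => (hb' x hx).1) le_rfl
    have hv : (L' ++ [d]).foldl (fun a d => a * 10 + d) 0
        = (L'.foldl (fun a d => a * 10 + d) 0) * 10 + d := by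
      simp
    have hpos : 0 < (L' ++ [d]).foldl (fun a d => a * 10 + d) 0 := by
      rcases L' with _ | ⟨h0, t⟩
      · have : 0 < d := hh d (by simp)
        simpa using this
      · have h0pos : 0 < h0 := hh h0 (by simp)
        have : 0 < (h0 :: t).foldl (fun a d => a * 10 + d) 0 := by
          have := pv_foldl_pos t h0 (fun x hx => (hb' x (by simp [hx])).1) h0pos
          simpa using this
        rw [hv] at *
        omega
    rw [bitMaskLoop2, dif_pos hpos, hv,
        PySem.Int.floordiv_eq_ediv_of_pos (by norm_num),
        PySem.Int.mod_eq_emod_of_pos (by norm_num)]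
    have hdiv : (L'.foldl (fun a d => a * 10 + d) 0 * 10 + d) / 10
        = L'.foldl (fun a d => a * 10 + d) 0 := by omega
    have hmod : (L'.foldl (fun a d => a * 10 + d) 0 * 10 + d) % 10 = d := by omega
    rw [hdiv, hmod]
    rw [ih hb' (by
      intro x hxh
      rcases L' with _ | ⟨h0, t⟩
      · simp at hxh
      · simp only [List.head?_cons, Option.some.injEq] at hxh
        have hp : 0 < h0 := hh h0 (by simp)
        omega)]
    simp

-- ===== VERDICT (by name: the statement is the Claim_ definition above) =====
theorem pv_loop2_lastdigit (m acc : Int) : 0 < m → bitMaskLoop2 m acc % 10 ≠ 0 := by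
  fun_induction bitMaskLoop2 m acc with
  | case1 m acc h ih =>
    intro _
    by_cases hge : 0 < PySem.Int.floordiv m 10
    · exact ih hge
    · have hed : PySem.Int.floordiv m 10 = m / 10 :=
        PySem.Int.floordiv_eq_ediv_of_pos (by norm_num)
      have hz : PySem.Int.floordiv m 10 = 0 := by rw [hed]; rw [hed] at hge; omega
      rw [hz, pv_loop2_stop 0 _ (by norm_num),
          PySem.Int.mod_eq_emod_of_pos (by norm_num)]
      have h10 : m < 10 := by rw [hed] at hge; omega
      omega
  | case2 m acc h => intro hm; exact absurd hm h

theorem pv_foldr_nonneg (L : List Int) (hL : ∀ d ∈ L, 0 ≤ d) :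
    0 ≤ L.foldr (fun d a => d + 10 * a) 0 := by
  induction L with
  | nil => norm_num
  | cons d t ih =>
    have hd := hL d (by simp)
    have ht := ih fun x hx => hL x (List.mem_cons_of_mem _ hx)
    simp only [List.foldr_cons]
    omega

theorem pv_foldr_pos (L : List Int) (hL : ∀ d ∈ L, 0 ≤ d) (hex : ∃ d ∈ L, d ≠ 0) :
    0 < L.foldr (fun d a => d + 10 * a) 0 := by
  induction L with
  | nil => simp at hex
  | cons d t ih =>
    have hd := hL d (by simp)
    have ht := pv_foldr_nonneg t fun x hx => hL x (List.mem_cons_of_mem _ hx)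
    obtain ⟨x, hx, hxne⟩ := hex
    simp only [List.foldr_cons]
    rcases List.mem_cons.1 hx with hx | hx
    · subst hx; omega
    · have := ih (fun y hy => hL y (List.mem_cons_of_mem _ hy)) ⟨x, hx, hxne⟩
      omega

theorem pv_be_pos (L : List Int) :
    (∀ d ∈ L, 0 ≤ d) → (∃ d ∈ L, d ≠ 0) → 0 < L.foldl (fun a d => a * 10 + d) 0 := by
  induction L with
  | nil => intro _ hex; simp at hex
  | cons d t ih =>
    intro hL hex
    have hd := hL d (by simp)
    obtain ⟨x, hx, hxne⟩ := hex
    rcases List.mem_cons.1 hx with hxd | hxt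
    · subst hxd
      exact pv_foldl_pos t ((0:Int) * 10 + x)
        (fun y hy => hL y (List.mem_cons_of_mem _ hy)) (by omega)
    · by_cases hd0 : d = 0
      · subst hd0
        simpa using ih (fun y hy => hL y (List.mem_cons_of_mem _ hy)) ⟨x, hxt, hxne⟩
      · exact pv_foldl_pos t ((0:Int) * 10 + d)
          (fun y hy => hL y (List.mem_cons_of_mem _ hy)) (by omega)

theorem pv_sel_nonempty_pos (number mask : Int) (h : pvSelDigits number mask ≠ []) :
    0 < number := by
  by_contra hn
  exact h (pv_sel_empty number mask hn)

theorem bit_mask_spec : Claim_unchanged_bit_mask := by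
  intro number mask hdom hnd
  rw [Dom_bit_mask] at hdom
  simp only [pvDomInt, Bool.and_eq_true, decide_eq_true_eq] at hdom
  rw [pv_D_iff number mask hdom.1.2] at hnd
  show bit_mask number mask = bit_mask_alt number mask
  rw [bit_mask, bit_mask_alt, pv_loop1_eq, pv_altloop_eq]
  rcases hL : (pvSelDigits number mask).head? with _ | d0
  · rw [List.head?_eq_none_iff] at hL
    rw [hL]
    simpa using pv_loop2_stop 0 0 (by norm_num)
  · by_cases hd0 : d0 = 0
    · subst hd0
      have hpos : 0 < number :=
        pv_sel_nonempty_pos number mask (by intro he; rw [he] at hL; simp at hL)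
      have hall : ∀ d ∈ pvSelDigits number mask, d = 0 := by
        by_contra hex
        push Not at hex
        exact hnd ⟨hpos, hL, hex⟩
      rw [pv_foldl_zero _ hall, pv_foldr_zero _ hall]
      simpa using pv_loop2_stop 0 0 (by norm_num)
    · have hb := pv_sel_bounds number mask
      have hmem : d0 ∈ pvSelDigits number mask := List.mem_of_mem_head? (by rw [hL]; rfl)
      have hd0pos : 0 < d0 := by
        have := hb d0 hmem
        omega
      rw [pv_loop2_be _ hb (by intro x hx; rw [hL] at hx; injection hx with hx; omega) 0,
          pv_foldl_reverse_eq_foldr]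
      ring

theorem pv_sel_w : pvSelDigits 10 3 = [0, 1] := by
  rw [pvSelDigits, dif_pos (by norm_num), pvSelDigits, dif_pos (by norm_num),
      pvSelDigits]
  norm_num [PySem.Int.mod_eq_emod_of_pos, PySem.Int.floordiv_eq_ediv_of_pos]

theorem bit_mask_changed : Claim_changed_bit_mask := by
  unfold Claim_changed_bit_mask pvDiffWitness_bit_mask pvDiffWitnessOut_bit_mask
  refine ⟨by decide, by decide, ?_, ?_, by decide⟩
  · show bit_mask 10 3 = 1
    rw [bit_mask, pv_loop1_eq, pv_sel_w]
    rw [show ([0, 1] : List Int).foldl (fun a d => a * 10 + d) 0 = 1 by rfl]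
    rw [bitMaskLoop2, dif_pos (by norm_num), bitMaskLoop2]
    norm_num [PySem.Int.mod_eq_emod_of_pos, PySem.Int.floordiv_eq_ediv_of_pos]
  · show bit_mask_alt 10 3 = 10
    rw [bit_mask_alt, pv_altloop_eq, pv_sel_w]
    rfl

theorem bit_mask_tight : Claim_exact_bit_mask := by
  intro number mask hdom hD
  rw [Dom_bit_mask] at hdom
  simp only [pvDomInt, Bool.and_eq_true, decide_eq_true_eq] at hdom
  rw [pv_D_iff number mask hdom.1.2] at hD
  obtain ⟨h0, hh, hmem⟩ := hD
  have hb := pv_sel_bounds number mask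
  rw [bit_mask, bit_mask_alt, pv_loop1_eq, pv_altloop_eq]
  rcases hL : pvSelDigits number mask with _ | ⟨d0, t⟩
  · rw [hL] at hh
    simp at hh
  · simp only [hL] at hh hmem hb ⊢
    rw [List.head?_cons, Option.some.injEq] at hh
    subst hh
    have hA : bitMaskLoop2 ((0 :: t).foldl (fun a d => a * 10 + d) 0) 0 % 10 ≠ 0 :=
      pv_loop2_lastdigit _ 0 (pv_be_pos _ (fun x hx => (hb x hx).1) hmem)
    have hBpos : 0 < (0 :: t).foldr (fun d a => d + 10 * a) 0 :=
      pv_foldr_pos _ (fun x hx => (hb x hx).1) hmem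
    have hBmod : (0 :: t).foldr (fun d a => d + 10 * a) 0 % 10 = 0 := by
      simp only [List.foldr_cons]
      have := pv_foldr_nonneg t fun x hx => (hb x (List.mem_cons_of_mem _ hx)).1
      omega
    intro heq
    rw [heq] at hA
    omega
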